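-- pv_equiv track=rewrite | github.com/rezaprasetya241/CodeWars | char code calculation.py | calc
-- ===== SOURCE A (Python) =====
-- def calc(x):
--     # your code here
--     total1 = ""
--     totalNum = 0
--     totalNum2 = 0
--     for i in x:
--         convWord = ord(i)
--         total1 = total1 + str(convWord)
--     total2 = total1.replace("7","1")
--     for i in total1:
--         totalNum +=int(i)
--     for i in total2:
--         totalNum2 += int(i)
--     return totalNum-totalNum2
-- ===== SOURCE B (Python) =====
-- def calc(x):
--     # Replacing '7' by '1' changes each digit sum by 6 per '7'; every other
--     # digit cancels, so the difference is 6 times the number of '7' digits.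
--     return 6 * sum(str(ord(c)).count("7") for c in x)
-- ===== Notes on version B (the rewrite author's own statement) =====
-- stated objective: simpler
-- what changed: Every digit except 7 cancels between the two digit sums and each 7-digit contributes 7-1=6, so B returns 6 times the count of such digits among the ord codes, eliminating the concatenated string, the replace pass and both digit-sum loops.
import Mathlib
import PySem

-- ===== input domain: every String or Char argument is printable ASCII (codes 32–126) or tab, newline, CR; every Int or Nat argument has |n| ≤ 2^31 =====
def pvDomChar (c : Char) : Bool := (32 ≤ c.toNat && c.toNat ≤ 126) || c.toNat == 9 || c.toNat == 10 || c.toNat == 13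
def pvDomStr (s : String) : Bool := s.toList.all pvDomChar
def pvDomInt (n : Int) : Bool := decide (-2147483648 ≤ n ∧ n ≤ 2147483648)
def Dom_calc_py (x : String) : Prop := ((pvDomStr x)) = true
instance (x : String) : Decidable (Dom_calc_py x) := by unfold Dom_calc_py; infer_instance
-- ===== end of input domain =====

-- B replaces A's concatenate/replace/two-digit-sum passes by the closed form
-- 6 × (number of '7' digits among the ord codes); same value, simpler one-pass code.

-- ===== PORT A =====
def calc_py (x : String) : Int :=
  let total1 : List Char := x.toList.foldl (fun acc i => acc ++ PySem.Int.toChars ((i.toNat : Int))) []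
  let total2 : List Char := PySem.Chars.replace total1 ['7'] ['1']
  let totalNum : Int := total1.foldl (fun s i => s + (PySem.Int.ofChars? [i]).getD 0) 0
  let totalNum2 : Int := total2.foldl (fun s i => s + (PySem.Int.ofChars? [i]).getD 0) 0
  totalNum - totalNum2

-- ===== PORT B =====
def calc_py_alt (x : String) : Int :=
  6 * x.toList.foldl (fun s c => s + ((PySem.Chars.count (PySem.Int.toChars ((c.toNat : Int))) ['7'] : Int))) 0

-- ===== PRECONDITION & SPEC =====
def Spec_calc_py (x : String) (out : Int) : Prop := out = calc_py_alt x
instance (x : String) (out : Int) : Decidable (Spec_calc_py x out) := by unfold Spec_calc_py; infer_instance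

-- ===== CLAIM (what is proved, stated in full; the proofs are below) =====
def Claim_equal_calc_py : Prop := ∀ (x : String), Dom_calc_py x → Spec_calc_py x (calc_py x)

-- ===== LEMMAS AND PROOFS =====

-- the per-character effect of Python's "7"->"1" replacement
def pvRepl (c : Char) : Char := if c = '7' then '1' else c

-- Python's int(i) for a single character, total form (as in the port)
def pvDig (c : Char) : Int := (PySem.Int.ofChars? [c]).getD 0

lemma pv_repl_go (l acc : List Char) (fuel : Nat) (h : l.length ≤ fuel) :
    PySem.Chars.replace.go ['7'] ['1'] fuel l acc = acc.reverse ++ l.map pvRepl := by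
  induction l generalizing acc fuel with
  | nil => cases fuel <;> simp [PySem.Chars.replace.go]
  | cons c t ih =>
    cases fuel with
    | zero => simp at h
    | succ n =>
      rw [show PySem.Chars.replace.go ['7'] ['1'] (n+1) (c::t) acc
            = if ['7'].isPrefixOf (c::t) then PySem.Chars.replace.go ['7'] ['1'] n t (['1'].reverse ++ acc)
              else PySem.Chars.replace.go ['7'] ['1'] n t (c::acc) from rfl]
      simp only [List.length_cons, Nat.add_le_add_iff_right] at h
      by_cases hc : c = '7'
      · simp [hc, ih _ _ h, pvRepl]
      · simp [List.isPrefixOf, ih _ _ h, pvRepl, hc, Ne.symm hc]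

lemma pv_replace_eq (l : List Char) :
    PySem.Chars.replace l ['7'] ['1'] = l.map pvRepl := by
  simp [PySem.Chars.replace, pv_repl_go l [] l.length le_rfl]

lemma pv_count_go (l : List Char) (acc fuel : Nat) (h : l.length ≤ fuel) :
    PySem.Chars.count.go ['7'] fuel l acc = acc + l.count '7' := by
  induction l generalizing acc fuel with
  | nil => cases fuel <;> simp [PySem.Chars.count.go]
  | cons c t ih =>
    cases fuel with
    | zero => simp at h
    | succ n =>
      rw [show PySem.Chars.count.go ['7'] (n+1) (c::t) acc
            = if ['7'].isPrefixOf (c::t) then PySem.Chars.count.go ['7'] n t (acc+1)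
              else PySem.Chars.count.go ['7'] n t acc from rfl]
      simp only [List.length_cons, Nat.add_le_add_iff_right] at h
      by_cases hc : c = '7'
      · simp [hc, ih _ _ h]; omega
      · simp [List.isPrefixOf, ih _ _ h, hc, Ne.symm hc]

lemma pv_count_eq (l : List Char) : PySem.Chars.count l ['7'] = l.count '7' := by
  simp [PySem.Chars.count, pv_count_go l 0 l.length le_rfl]

-- digit-sum difference: every character cancels except '7', which contributes 7 - 1 = 6
lemma pv_sum_sub (l : List Char) :
    (l.map pvDig).sum - ((l.map pvRepl).map pvDig).sum = 6 * (l.count '7' : Int) := by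
  induction l with
  | nil => simp
  | cons c t ih =>
    simp only [List.map_cons, List.sum_cons, List.count_cons, beq_iff_eq]
    by_cases hc : c = '7'
    · have h7 : pvDig '7' = 7 := by decide
      have h1 : pvDig (pvRepl '7') = 1 := by decide
      subst hc
      rw [if_pos rfl, h7, h1]
      push_cast
      linarith [ih]
    · have hr : pvRepl c = c := if_neg hc
      rw [hr, if_neg hc]
      push_cast
      linarith [ih]

theorem pv_main (x : String) : calc_py x = calc_py_alt x := by
  simp only [calc_py, calc_py_alt]
  rw [PySem.List.foldl_append_eq_flatMap, List.nil_append, pv_replace_eq,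
      PySem.List.foldl_add, PySem.List.foldl_add,
      PySem.List.foldl_add]
  have hflat : (x.toList.flatMap fun i => PySem.Int.toChars ((i.toNat : Int)))
      = (x.toList.map fun i => PySem.Int.toChars ((i.toNat : Int))).flatten := by
    simp [List.flatMap_def]
  rw [zero_add, zero_add, zero_add,
      show (fun i => (PySem.Int.ofChars? [i]).getD 0) = pvDig from rfl,
      pv_sum_sub, hflat, List.count_flatten]
  simp only [List.map_map, Function.comp_def, pv_count_eq]
  push_cast
  simp [List.map_map, Function.comp_def]

-- ===== VERDICT (by name: the statement is the Claim_ definition above) =====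
theorem calc_py_spec : Claim_equal_calc_py := by
  intro x _
  unfold Spec_calc_py
  exact pv_main x
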